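-- pv_equiv track=rewrite | github.com/Priyanshu-2109/VisionFlow | backend - ml/app/modules/market_simulator/simulator.py | _identify_best_scenario
-- ===== SOURCE A (Python) =====
-- from typing import Dict, List, Any, Optional, Tuple
--
-- def _identify_best_scenario(scenario_type: str,
--                            comparison_metrics: List[Dict[str, Any]]) -> Dict[str, Any]:
--     """Identify the best scenario based on key metrics"""
--     if not comparison_metrics:
--         return None
--
--     # Determine the best scenario based on scenario type
--     if scenario_type == 'price_change':
--         # Sort by total revenue (descending)
--         sorted_scenarios = sorted(comparison_metrics, key=lambda x: x.get('total_revenue', 0), reverse=True)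
--
--         # Best scenario is the one with highest revenue that doesn't significantly reduce market share
--         for scenario in sorted_scenarios:
--             if scenario.get('market_share_change', -100) > -5:  # Threshold: -5% market share change
--                 return scenario
--
--         # If all scenarios reduce market share significantly, return the one with highest revenue
--         return sorted_scenarios[0] if sorted_scenarios else None
--
--     elif scenario_type == 'marketing_spend_change':
--         # Sort by marketing ROI (descending)
--         return max(comparison_metrics, key=lambda x: x.get('marketing_roi', 0), default=None)
--
--     elif scenario_type == 'product_launch':
--         # Sort by ROI (descending)
--         sorted_by_roi = sorted(comparison_metrics, key=lambda x: x.get('roi', 0), reverse=True)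
--
--         # Best scenario is the one with highest ROI that breaks even within a reasonable time
--         for scenario in sorted_by_roi:
--             breakeven = scenario.get('breakeven_period')
--             if breakeven is not None and breakeven <= 18:  # Threshold: 18 months
--                 return scenario
--
--         # If no scenario breaks even within threshold, return the one with highest ROI
--         return sorted_by_roi[0] if sorted_by_roi else None
-- ===== SOURCE B (Python) =====
-- def _identify_best_scenario(scenario_type, comparison_metrics):
--     """Single pass: pick key/qualifier per scenario type, then keep the earliest
--     strict-maximum overall and the earliest strict-maximum qualifying element."""
--     if not comparison_metrics:
--         return None
--
--     if scenario_type == 'price_change':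
--         key = lambda x: x.get('total_revenue', 0)
--         ok = lambda x: x.get('market_share_change', -100) > -5
--     elif scenario_type == 'marketing_spend_change':
--         key = lambda x: x.get('marketing_roi', 0)
--         ok = lambda x: True
--     elif scenario_type == 'product_launch':
--         key = lambda x: x.get('roi', 0)
--         ok = lambda x: x.get('breakeven_period') is not None and x.get('breakeven_period') <= 18
--     else:
--         return None
--
--     best = None
--     best_ok = None
--     for s in comparison_metrics:
--         if best is None or key(s) > key(best):
--             best = s
--         if ok(s) and (best_ok is None or key(s) > key(best_ok)):
--             best_ok = s
--     return best_ok if best_ok is not None else best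
-- ===== Notes on version B (the rewrite author's own statement) =====
-- stated objective: alternative
-- what changed: Replaces the per-branch sort-then-scan (and max call) with one uniform single pass that keeps the earliest strict-maximum element overall and among threshold-qualifying elements, choosing key/qualifier per scenario type up front.
import Mathlib
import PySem

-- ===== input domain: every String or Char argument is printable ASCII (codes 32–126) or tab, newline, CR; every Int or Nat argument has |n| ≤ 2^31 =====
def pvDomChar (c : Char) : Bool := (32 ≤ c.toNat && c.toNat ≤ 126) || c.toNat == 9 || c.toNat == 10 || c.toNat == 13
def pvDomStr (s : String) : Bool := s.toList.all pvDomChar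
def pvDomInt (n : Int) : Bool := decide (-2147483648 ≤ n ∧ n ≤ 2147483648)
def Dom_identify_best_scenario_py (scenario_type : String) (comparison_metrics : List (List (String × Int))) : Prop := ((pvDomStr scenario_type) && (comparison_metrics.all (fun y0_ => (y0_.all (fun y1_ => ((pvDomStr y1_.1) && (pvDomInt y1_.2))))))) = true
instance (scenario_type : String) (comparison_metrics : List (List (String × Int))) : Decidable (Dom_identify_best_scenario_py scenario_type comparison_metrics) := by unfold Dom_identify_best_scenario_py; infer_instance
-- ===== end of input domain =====

-- B replaces A's per-branch sort-then-scan by one uniform single pass keeping the earliest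
-- strict-maximum element overall and among qualifying elements (alternative decomposition).

-- ===== PORT A =====
-- dict.get(k, v) on an association list: first match, else default
def pvGetD (d : List (String × Int)) (k : String) (v : Int) : Int :=
  match d.find? (fun p => p.1 == k) with
  | some p => p.2
  | none => v

-- dict.get(k) (default None)
def pvGet? (d : List (String × Int)) (k : String) : Option Int :=
  (d.find? (fun p => p.1 == k)).map (fun p => p.2)

def identify_best_scenario_py (scenario_type : String) (comparison_metrics : List (List (String × Int))) : Option (List (String × Int)) :=
  if comparison_metrics = [] then none
  else if scenario_type = "price_change" then
    let ss := PySem.List.sorted comparison_metrics (fun x => pvGetD x "total_revenue" 0) true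
    match ss.find? (fun s => decide ((-5 : Int) < pvGetD s "market_share_change" (-100))) with
    | some s => some s
    | none => match ss with | [] => none | h :: _ => some h
  else if scenario_type = "marketing_spend_change" then
    PySem.List.max? comparison_metrics (fun x => pvGetD x "marketing_roi" 0)
  else if scenario_type = "product_launch" then
    let ss := PySem.List.sorted comparison_metrics (fun x => pvGetD x "roi" 0) true
    match ss.find? (fun s => match pvGet? s "breakeven_period" with
                             | some b => decide (b ≤ 18)
                             | none => false) with
    | some s => some s
    | none => match ss with | [] => none | h :: _ => some h
  else none

-- ===== PORT B =====
-- 'if best is None or key(s) > key(best): best = s' as one step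
def pvBest {α : Type} (key : α → Int) (acc : Option α) (s : α) : Option α :=
  match acc with
  | none => some s
  | some b => if key b < key s then some s else some b

def identify_best_scenario_py_alt (scenario_type : String) (comparison_metrics : List (List (String × Int))) : Option (List (String × Int)) :=
  if comparison_metrics = [] then none
  else
    match (if scenario_type = "price_change" then
             some ((fun x => pvGetD x "total_revenue" 0),
                   (fun x => decide ((-5 : Int) < pvGetD x "market_share_change" (-100))))
           else if scenario_type = "marketing_spend_change" then
             some ((fun x => pvGetD x "marketing_roi" 0), (fun _ => true))
           else if scenario_type = "product_launch" then
             some ((fun x => pvGetD x "roi" 0),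
                   (fun x => match pvGet? x "breakeven_period" with
                             | some b => decide (b ≤ 18)
                             | none => false))
           else none : Option ((List (String × Int) → Int) × (List (String × Int) → Bool))) with
    | none => none
    | some kq =>
      let r := comparison_metrics.foldl
        (fun acc s => (pvBest kq.1 acc.1 s, if kq.2 s then pvBest kq.1 acc.2 s else acc.2))
        (none, none)
      match r.2 with
      | some s => some s
      | none => r.1

-- ===== PRECONDITION & SPEC =====
def Spec_identify_best_scenario_py (scenario_type : String) (comparison_metrics : List (List (String × Int))) (out : Option (List (String × Int))) : Prop := out = identify_best_scenario_py_alt scenario_type comparison_metrics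
instance (scenario_type : String) (comparison_metrics : List (List (String × Int))) (out : Option (List (String × Int))) : Decidable (Spec_identify_best_scenario_py scenario_type comparison_metrics out) := by unfold Spec_identify_best_scenario_py; infer_instance

-- ===== CLAIM (what is proved, stated in full; the proofs are below) =====
def Claim_equal_identify_best_scenario_py : Prop := ∀ (scenario_type : String) (comparison_metrics : List (List (String × Int))), Dom_identify_best_scenario_py scenario_type comparison_metrics → Spec_identify_best_scenario_py scenario_type comparison_metrics (identify_best_scenario_py scenario_type comparison_metrics)

-- ===== LEMMAS AND PROOFS =====

-- find? over insertBy into a descending-sorted list = the conditional best-update step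
lemma pv_find_insertBy {α : Type} (k : α → Int) (q : α → Bool) (x : α) (ys : List α)
    (h : ys.Pairwise (fun a b => k b ≤ k a)) :
    (PySem.List.insertBy (fun a b => decide (k b < k a)) x ys).find? q
      = if q x then
          (match ys.find? q with
           | none => some x
           | some m => if k m < k x then some x else some m)
        else ys.find? q := by
  induction ys with
  | nil =>
    simp only [PySem.List.insertBy, List.find?]
    cases q x <;> simp
  | cons y t ih =>
    rw [List.pairwise_cons] at h
    obtain ⟨hy, ht⟩ := h
    simp only [PySem.List.insertBy]
    by_cases hlt : k y < k x
    · simp only [hlt, decide_true, if_true]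
      cases hq : q x <;> cases hqy : q y
      · simp [List.find?_cons_of_neg, hq, hqy]
      · simp [List.find?_cons_of_neg, hq, List.find?_cons_of_pos, hqy]
      · rcases hm : t.find? q with _ | m
        · simp [List.find?_cons_of_pos, hq, List.find?_cons_of_neg, hqy, hm]
        · have hmem := List.mem_of_find?_eq_some hm
          have hmx : k m < k x := lt_of_le_of_lt (hy m hmem) hlt
          simp [List.find?_cons_of_pos, hq, List.find?_cons_of_neg, hqy, hm, hmx]
      · simp [List.find?_cons_of_pos, hq, hqy, hlt]
    · simp only [hlt, decide_false, Bool.false_eq_true, if_false]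
      cases hqy : q y
      · rw [List.find?_cons_of_neg (by simp [hqy]), List.find?_cons_of_neg (by simp [hqy]),
            ih ht]
      · rw [List.find?_cons_of_pos (by simp [hqy]), List.find?_cons_of_pos (by simp [hqy])]
        cases q x <;> simp [hlt]

-- sorted(xs + [x]) is insertBy into sorted(xs) (stable insertion sort, reverse=True)
lemma pv_sorted_snoc {α : Type} (k : α → Int) (xs : List α) (x : α) :
    PySem.List.sorted (xs ++ [x]) k true
      = PySem.List.insertBy (fun a b => decide (k b < k a)) x (PySem.List.sorted xs k true) := by
  rw [PySem.List.sorted_rev_eq_foldl_insertBy, PySem.List.sorted_rev_eq_foldl_insertBy,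
      List.foldl_append]
  rfl

-- find? over the descending stable sort = the single-pass qualifying-best fold
lemma pv_find_sorted {α : Type} (k : α → Int) (q : α → Bool) (xs : List α) :
    (PySem.List.sorted xs k true).find? q
      = xs.foldl (fun acc x => if q x then pvBest k acc x else acc) none := by
  induction xs using List.reverseRecOn with
  | nil => simp [PySem.List.sorted]
  | append_singleton xs x ih =>
    rw [pv_sorted_snoc, List.foldl_append,
        pv_find_insertBy k q x _ (PySem.List.sorted_pairwise_rev xs k), ih]
    simp only [List.foldl]
    cases hq : q x
    · simp
    · simp only [if_true]
      rcases (PySem.List.sorted xs k true).find? q with _ | m <;> simp [pvBest]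

-- head of the descending stable sort = the single-pass overall-best fold
lemma pv_head_sorted {α : Type} (k : α → Int) (xs : List α) :
    (PySem.List.sorted xs k true).head?
      = xs.foldl (pvBest k) none := by
  have h := pv_find_sorted k (fun _ => true) xs
  simp only [if_true] at h
  rw [← h]
  rcases PySem.List.sorted xs k true with _ | ⟨a, t⟩ <;> simp [List.find?]

-- max(xs, key, default=None) is the overall-best fold
lemma pv_max_eq_fold {α : Type} (k : α → Int) (xs : List α) :
    PySem.List.max? xs k = xs.foldl (pvBest k) none := rfl

-- A's sort-then-scan branch = B's paired single pass, for any key and qualifier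
lemma pv_branch_eq (key : List (String × Int) → Int) (q : List (String × Int) → Bool)
    (cm : List (List (String × Int))) :
    (match (PySem.List.sorted cm key true).find? q with
     | some s => some s
     | none => match PySem.List.sorted cm key true with | [] => none | h :: _ => some h)
      = (match (cm.foldl (fun acc s => (pvBest key acc.1 s, if q s then pvBest key acc.2 s else acc.2))
                 ((none : Option (List (String × Int))), (none : Option (List (String × Int))))).2 with
         | some s => some s
         | none => (cm.foldl (fun acc s => (pvBest key acc.1 s, if q s then pvBest key acc.2 s else acc.2))
                 ((none : Option (List (String × Int))), (none : Option (List (String × Int))))).1) := by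
  rw [PySem.List.foldl_prod_mk (f := fun acc s => pvBest key acc s)
        (g := fun acc s => if q s then pvBest key acc s else acc)]
  rw [← pv_find_sorted, ← pv_head_sorted]
  rcases (PySem.List.sorted cm key true).find? q with _ | m
  · rcases PySem.List.sorted cm key true with _ | ⟨a, t⟩ <;> simp
  · rfl

-- ===== VERDICT (by name: the statement is the Claim_ definition above) =====
theorem identify_best_scenario_py_spec : Claim_equal_identify_best_scenario_py := by
  intro st cm _
  unfold Spec_identify_best_scenario_py identify_best_scenario_py identify_best_scenario_py_alt
  by_cases hcm : cm = []
  · simp [hcm]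
  · simp only [hcm, if_false]
    by_cases h1 : st = "price_change"
    · simp only [h1, if_true]
      exact pv_branch_eq _ _ cm
    · simp only [h1, if_false]
      by_cases h2 : st = "marketing_spend_change"
      · simp only [h2, if_true]
        rw [pv_max_eq_fold]
        rw [PySem.List.foldl_prod_mk (f := fun acc s => pvBest (fun x => pvGetD x "marketing_roi" 0) acc s)
              (g := fun acc s => pvBest (fun x => pvGetD x "marketing_roi" 0) acc s)]
        rcases cm.foldl (pvBest (fun x => pvGetD x "marketing_roi" 0)) none with _ | m <;> rfl
      · simp only [h2, if_false]
        by_cases h3 : st = "product_launch"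
        · simp only [h3, if_true]
          exact pv_branch_eq _ _ cm
        · simp [h3]
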